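-- pv_equiv track=rewrite | github.com/joshualukecaine/hevy | src/hevy/core/validation.py | is_valid_hevy_id
-- ===== SOURCE A (Python) =====
-- def is_valid_hevy_id(template_id: str) -> bool:
--     """Check if a template ID has a valid Hevy format.
--
--     Accepts both formats:
--     - 8 character hexadecimal (e.g., '3D0C7C75') - built-in exercises
--     - UUID format (e.g., '13084c79-fd76-432e-b7d6-4ad3c67ddf81') - custom exercises
--     """
--     if not template_id:
--         return False
--
--     # Check for 8-character hex format (built-in exercises)
--     if len(template_id) == 8:
--         return all(c in "0123456789ABCDEFabcdef" for c in template_id)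
--
--     # Check for UUID format (custom exercises)
--     if len(template_id) == 36 and template_id.count("-") == 4:
--         parts = template_id.split("-")
--         if (
--             len(parts) == 5
--             and len(parts[0]) == 8
--             and len(parts[1]) == 4
--             and len(parts[2]) == 4
--             and len(parts[3]) == 4
--             and len(parts[4]) == 12
--         ):
--             return all(c in "0123456789ABCDEFabcdef-" for c in template_id)
--
--     return False
-- ===== SOURCE B (Python) =====
-- _HEX = frozenset("0123456789ABCDEFabcdef")
--
-- # Compiled "regex" patterns: 'h' = one hex digit, '-' = a literal dash.
-- _PATTERNS = (
--     "hhhhhhhh",                               # 8-char hex (built-in exercises)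
--     "hhhhhhhh-hhhh-hhhh-hhhh-hhhhhhhhhhhh",   # UUID (custom exercises)
-- )
--
--
-- def _matches(pattern, s):
--     return len(pattern) == len(s) and all(
--         (c == "-") if p == "-" else (c in _HEX) for p, c in zip(pattern, s)
--     )
--
--
-- def is_valid_hevy_id(template_id: str) -> bool:
--     return any(_matches(p, template_id) for p in _PATTERNS)
-- ===== Notes on version B (the rewrite author's own statement) =====
-- stated objective: alternative
-- what changed: Replaced A's length dispatch with dash counting, string splitting and five part-length checks by a regex-style matcher: an alternation of two fixed character-class patterns (8-hex, and the UUID shape with dashes at fixed positions) each checked in a single zip scan.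
import Mathlib
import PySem

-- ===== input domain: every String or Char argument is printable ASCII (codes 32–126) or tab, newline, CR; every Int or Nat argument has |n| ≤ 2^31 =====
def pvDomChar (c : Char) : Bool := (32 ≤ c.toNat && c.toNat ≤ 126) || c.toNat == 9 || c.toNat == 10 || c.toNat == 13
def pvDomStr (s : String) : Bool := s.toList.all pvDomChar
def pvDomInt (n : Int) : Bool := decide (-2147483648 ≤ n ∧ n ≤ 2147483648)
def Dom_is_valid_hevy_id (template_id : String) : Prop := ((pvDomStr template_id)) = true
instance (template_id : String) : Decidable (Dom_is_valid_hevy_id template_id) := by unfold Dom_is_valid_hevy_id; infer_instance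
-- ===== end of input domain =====

-- B replaces A's length dispatch, dash counting and split("-") with a regex-style matcher:
-- an alternation of two fixed character-class patterns checked in one zip scan (objective: alternative/idiomatic).

-- ===== PORT A =====
-- literal transliteration of A: empty check, 8-char hex branch, then the 36-char branch with
-- count("-"), split("-"), the five part-length checks and the hex-or-dash scan.
-- 'c in "…"' is PySem.Chars.isIn of the singleton; parts[i] (guarded by the length check,
-- so in range) is PySem.List.pyGetD; split("-") is PySem.Chars.splitOn on .toList (exact; no Str wrapper exists).
def is_valid_hevy_id (template_id : String) : Bool :=
  if PySem.Str.len template_id == 0 then false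
  else if PySem.Str.len template_id == 8 then
    template_id.toList.all (fun c => PySem.Chars.isIn [c] "0123456789ABCDEFabcdef".toList)
  else if PySem.Str.len template_id == 36 && PySem.Str.count template_id "-" == 4 then
    let parts := PySem.Chars.splitOn template_id.toList "-".toList
    if parts.length == 5
        && (PySem.List.pyGetD parts 0 []).length == 8
        && (PySem.List.pyGetD parts 1 []).length == 4
        && (PySem.List.pyGetD parts 2 []).length == 4
        && (PySem.List.pyGetD parts 3 []).length == 4
        && (PySem.List.pyGetD parts 4 []).length == 12 then
      template_id.toList.all (fun c => PySem.Chars.isIn [c] "0123456789ABCDEFabcdef-".toList)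
    else false
  else false

-- ===== PORT B =====
-- Source B: _HEX, the two compiled patterns, _matches (equal lengths + zip scan), any().
def pvHexSet : List Char := "0123456789ABCDEFabcdef".toList

def pvPatterns : List (List Char) :=
  ["hhhhhhhh".toList, "hhhhhhhh-hhhh-hhhh-hhhh-hhhhhhhhhhhh".toList]

def pvMatches (pattern s : List Char) : Bool :=
  pattern.length == s.length &&
    (pattern.zip s).all (fun pc => if pc.1 == '-' then pc.2 == '-' else pvHexSet.contains pc.2)

def is_valid_hevy_id_alt (template_id : String) : Bool :=
  pvPatterns.any (fun p => pvMatches p template_id.toList)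

-- ===== PRECONDITION & SPEC =====
def Spec_is_valid_hevy_id (template_id : String) (out : Bool) : Prop := out = is_valid_hevy_id_alt template_id
instance (template_id : String) (out : Bool) : Decidable (Spec_is_valid_hevy_id template_id out) := by unfold Spec_is_valid_hevy_id; infer_instance

-- ===== CLAIM (what is proved, stated in full; the proofs are below) =====
def Claim_equal_is_valid_hevy_id : Prop := ∀ (template_id : String), Dom_is_valid_hevy_id template_id → Spec_is_valid_hevy_id template_id (is_valid_hevy_id template_id)

-- ===== LEMMAS AND PROOFS =====

-- PySem.Chars.count with a single-char separator is List.count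
theorem count_go_dash (fuel : Nat) : ∀ (l : List Char) (acc : Nat), l.length ≤ fuel →
    PySem.Chars.count.go ['-'] fuel l acc = acc + l.count '-' := by
  induction fuel with
  | zero =>
    intro l acc h
    have : l = [] := by cases l <;> simp_all
    subst this; simp [PySem.Chars.count.go]
  | succ n ih =>
    intro l acc h
    cases l with
    | nil => simp [PySem.Chars.count.go]
    | cons c t =>
      by_cases hc : c = '-'
      · subst hc
        rw [show PySem.Chars.count.go ['-'] (n+1) ('-'::t) acc
            = PySem.Chars.count.go ['-'] n t (acc+1) by
          simp [PySem.Chars.count.go, List.isPrefixOf]]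
        rw [ih _ _ (by simpa using h)]
        simp; omega
      · rw [show PySem.Chars.count.go ['-'] (n+1) (c::t) acc
            = PySem.Chars.count.go ['-'] n t acc by
          have : (['-'].isPrefixOf (c::t)) = false := by
            simp [List.isPrefixOf]; exact fun hh => hc hh.symm
          simp [PySem.Chars.count.go, this]]
        rw [ih _ _ (by simpa using h)]
        simp [hc]

theorem pys_count_dash (l : List Char) : PySem.Chars.count l ['-'] = l.count '-' := by
  simp [PySem.Chars.count, count_go_dash (l.length) l 0 (by omega)]

theorem modifyHead_id' {α : Type} (l : List α) : List.modifyHead (fun x => x) l = l := by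
  cases l <;> rfl

-- PySem.Chars.splitOn with a single-char separator is List.splitOn

-- PySem.Chars.splitOn with a single-char separator is List.splitOn
theorem splitOn_go_dash (fuel : Nat) : ∀ (l cur : List Char) (acc : List (List Char)), l.length < fuel →
    PySem.Chars.splitOn.go ['-'] fuel l cur acc
      = acc.reverse ++ (l.splitOn '-').modifyHead (cur.reverse ++ ·) := by
  induction fuel with
  | zero => intro l cur acc h; omega
  | succ n ih =>
    intro l cur acc h
    cases l with
    | nil =>
      rw [show PySem.Chars.splitOn.go ['-'] (n+1) [] cur acc = (cur.reverse :: acc).reverse by rfl]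
      simp [List.splitOn]
    | cons c t =>
      by_cases hc : c = '-'
      · subst hc
        rw [show PySem.Chars.splitOn.go ['-'] (n+1) ('-'::t) cur acc
            = PySem.Chars.splitOn.go ['-'] n t [] (cur.reverse :: acc) by
          simp [PySem.Chars.splitOn.go, List.isPrefixOf]]
        rw [ih _ _ _ (by simpa using h)]
        simp [List.splitOn, List.splitOnP_cons, modifyHead_id']
      · rw [show PySem.Chars.splitOn.go ['-'] (n+1) (c::t) cur acc
            = PySem.Chars.splitOn.go ['-'] n t (c :: cur) acc by
          have hpre : (['-'].isPrefixOf (c::t)) = false := by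
            simp [List.isPrefixOf]; exact fun hh => hc hh.symm
          simp [PySem.Chars.splitOn.go, hpre]]
        rw [ih _ _ _ (by simpa using h)]
        have hne := List.splitOnP_ne_nil (fun x => x == '-') t
        simp only [List.splitOn, List.splitOnP_cons, show (c == '-') = false by simpa using hc]
        cases hsp : List.splitOnP (fun x => x == '-') t with
        | nil => exact absurd hsp hne
        | cons p ps => simp

theorem pys_splitOn_dash (l : List Char) : PySem.Chars.splitOn l ['-'] = l.splitOn '-' := by
  rw [PySem.Chars.splitOn, splitOn_go_dash (l.length+1) l [] [] (by omega)]
  have hne := List.splitOnP_ne_nil (fun x => x == '-') l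
  simp only [List.splitOn] at *
  cases hsp : List.splitOnP (fun x => x == '-') l with
  | nil => exact absurd hsp hne
  | cons p ps => simp

theorem splitOn_no_dash (a : List Char) (h : '-' ∉ a) : a.splitOn '-' = [a] := by
  induction a with
  | nil => rfl
  | cons c t ih =>
    simp only [List.mem_cons, not_or] at h
    have hc : (c == '-') = false := by simpa using fun hh => h.1 hh.symm
    simp [List.splitOn, List.splitOnP_cons, hc] at *
    simp [ih h.2]

theorem splitOn_append_dash (a r : List Char) (h : '-' ∉ a) :
    (a ++ '-' :: r).splitOn '-' = a :: r.splitOn '-' := by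
  induction a with
  | nil => simp [List.splitOn, List.splitOnP_cons]
  | cons c t ih =>
    simp only [List.mem_cons, not_or] at h
    have hc : (c == '-') = false := by simpa using fun hh => h.1 hh.symm
    simp [List.splitOn, List.splitOnP_cons, hc] at *
    simp [ih h.2]

theorem hex_ne_dash (c : Char) (h : pvHexSet.contains c = true) : c ≠ '-' := by
  intro heq; rw [heq] at h; exact absurd h (by decide)

theorem matches_cons (p c : Char) (pt ct : List Char) :
    pvMatches (p :: pt) (c :: ct)
      = ((if p == '-' then c == '-' else pvHexSet.contains c) && pvMatches pt ct) := by
  simp only [pvMatches, List.length_cons, List.zip_cons_cons, List.all_cons]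
  rw [show ((pt.length + 1 == ct.length + 1)) = (pt.length == ct.length) by simp]
  cases hb : (if p == '-' then c == '-' else pvHexSet.contains c) with
  | false => simp
  | true => simp

theorem matches_rep_h (n : Nat) : ∀ (s : List Char),
    pvMatches (List.replicate n 'h') s = ((s.length == n) && s.all pvHexSet.contains) := by
  induction n with
  | zero => intro s; cases s <;> simp [pvMatches]
  | succ m ih =>
    intro s
    cases s with
    | nil => simp [pvMatches]
    | cons c t =>
      rw [List.replicate_succ, matches_cons]
      rw [ih t]
      simp [Bool.and_left_comm]

theorem matches_append (p1 p2 s : List Char) :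
    pvMatches (p1 ++ p2) s = true ↔
      ∃ s1 s2, s = s1 ++ s2 ∧ s1.length = p1.length ∧
        pvMatches p1 s1 = true ∧ pvMatches p2 s2 = true := by
  constructor
  · intro h
    simp only [pvMatches, Bool.and_eq_true, beq_iff_eq, List.length_append] at h
    obtain ⟨hlen, hall⟩ := h
    refine ⟨s.take p1.length, s.drop p1.length, (List.take_append_drop _ _).symm, ?_, ?_, ?_⟩
    · simp; omega
    · have h1 : p1.length = (s.take p1.length).length := by simp; omega
      have hz : (p1 ++ p2).zip s = p1.zip (s.take p1.length) ++ p2.zip (s.drop p1.length) := by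
        conv_lhs => rw [← List.take_append_drop p1.length s]
        exact List.zip_append h1
      rw [hz, List.all_append, Bool.and_eq_true] at hall
      simp only [pvMatches, Bool.and_eq_true, beq_iff_eq]
      exact ⟨h1, hall.1⟩
    · have h1 : p1.length = (s.take p1.length).length := by simp; omega
      have hz : (p1 ++ p2).zip s = p1.zip (s.take p1.length) ++ p2.zip (s.drop p1.length) := by
        conv_lhs => rw [← List.take_append_drop p1.length s]
        exact List.zip_append h1
      rw [hz, List.all_append, Bool.and_eq_true] at hall
      simp only [pvMatches, Bool.and_eq_true, beq_iff_eq]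
      constructor
      · simp; omega
      · exact hall.2
  · rintro ⟨s1, s2, rfl, hl1, hm1, hm2⟩
    simp only [pvMatches, Bool.and_eq_true, beq_iff_eq] at *
    obtain ⟨hl2, ha2⟩ := hm2
    refine ⟨by simp; omega, ?_⟩
    rw [List.zip_append hl1.symm, List.all_append, Bool.and_eq_true]
    exact ⟨hm1.2, ha2⟩

theorem matches_block (n : Nat) (rest s : List Char) :
    pvMatches (List.replicate n 'h' ++ '-' :: rest) s = true ↔
      ∃ a s', s = a ++ '-' :: s' ∧ a.length = n ∧ a.all pvHexSet.contains = true ∧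
        pvMatches rest s' = true := by
  rw [matches_append]
  constructor
  · rintro ⟨s1, s2, rfl, hl1, hm1, hm2⟩
    cases s2 with
    | nil => simp [pvMatches] at hm2
    | cons c s' =>
      rw [matches_cons] at hm2
      simp only [BEq.rfl, if_true, Bool.and_eq_true, beq_iff_eq] at hm2
      obtain ⟨rfl, hm2⟩ := hm2
      rw [matches_rep_h] at hm1
      simp only [Bool.and_eq_true, beq_iff_eq] at hm1
      exact ⟨s1, s', rfl, hm1.1, hm1.2, hm2⟩
  · rintro ⟨a, s', rfl, hla, hha, hm⟩
    refine ⟨a, '-' :: s', rfl, by simp [hla], ?_, ?_⟩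
    · rw [matches_rep_h]; simp [hla, hha]
    · rw [matches_cons]; simp [hm]

-- the decomposition both programs recognise on 36-char input
def pvDecomp (l : List Char) : Prop :=
  ∃ a b c d e : List Char,
    a.length = 8 ∧ b.length = 4 ∧ c.length = 4 ∧ d.length = 4 ∧ e.length = 12 ∧
    a.all pvHexSet.contains = true ∧ b.all pvHexSet.contains = true ∧
    c.all pvHexSet.contains = true ∧ d.all pvHexSet.contains = true ∧
    e.all pvHexSet.contains = true ∧
    l = a ++ '-' :: (b ++ '-' :: (c ++ '-' :: (d ++ '-' :: e)))

theorem p36_shape : "hhhhhhhh-hhhh-hhhh-hhhh-hhhhhhhhhhhh".toList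
    = List.replicate 8 'h' ++ '-' :: (List.replicate 4 'h' ++ '-' :: (List.replicate 4 'h'
      ++ '-' :: (List.replicate 4 'h' ++ '-' :: List.replicate 12 'h'))) := by decide

theorem matches_p36_iff (l : List Char) :
    pvMatches "hhhhhhhh-hhhh-hhhh-hhhh-hhhhhhhhhhhh".toList l = true ↔ pvDecomp l := by
  rw [p36_shape, matches_block]
  constructor
  · rintro ⟨a, s1, rfl, hla, hha, hm⟩
    rw [matches_block] at hm
    obtain ⟨b, s2, rfl, hlb, hhb, hm⟩ := hm
    rw [matches_block] at hm
    obtain ⟨c, s3, rfl, hlc, hhc, hm⟩ := hm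
    rw [matches_block] at hm
    obtain ⟨d, s4, rfl, hld, hhd, hm⟩ := hm
    rw [matches_rep_h] at hm
    simp only [Bool.and_eq_true, beq_iff_eq] at hm
    exact ⟨a, b, c, d, s4, hla, hlb, hlc, hld, hm.1, hha, hhb, hhc, hhd, hm.2, rfl⟩
  · rintro ⟨a, b, c, d, e, hla, hlb, hlc, hld, hle, hha, hhb, hhc, hhd, hhe, rfl⟩
    refine ⟨a, _, rfl, hla, hha, ?_⟩
    rw [matches_block]
    refine ⟨b, _, rfl, hlb, hhb, ?_⟩
    rw [matches_block]
    refine ⟨c, _, rfl, hlc, hhc, ?_⟩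
    rw [matches_block]
    refine ⟨d, _, rfl, hld, hhd, ?_⟩
    rw [matches_rep_h]
    simp [hle, hhe]

theorem hexdash_shape : "0123456789ABCDEFabcdef-".toList = pvHexSet ++ ['-'] := by decide

theorem all_hex_of (p : List Char) (hnd : '-' ∉ p)
    (h : p.all (fun c => ("0123456789ABCDEFabcdef-".toList).contains c) = true) :
    p.all pvHexSet.contains = true := by
  rw [List.all_eq_true] at h ⊢
  intro c hc
  have := h c hc
  rw [hexdash_shape] at this
  simp only [List.contains_append, Bool.or_eq_true] at this
  rcases this with h1 | h1
  · exact h1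
  · simp at h1; exact absurd (h1 ▸ hc) hnd

theorem all_hexdash_of (p : List Char) (h : p.all pvHexSet.contains = true) :
    p.all (fun c => ("0123456789ABCDEFabcdef-".toList).contains c) = true := by
  rw [List.all_eq_true] at h ⊢
  intro c hc
  rw [hexdash_shape]
  simp only [List.contains_append, Bool.or_eq_true]
  exact Or.inl (h c hc)

theorem not_dash_mem (p : List Char) (h : p.all pvHexSet.contains = true) : '-' ∉ p := by
  rw [List.all_eq_true] at h
  intro hm
  exact hex_ne_dash '-' (h '-' hm) rfl

theorem a36_iff (l : List Char) :
    (l.count '-' = 4 ∧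
      ((l.splitOn '-').length = 5 ∧ (PySem.List.pyGetD (l.splitOn '-') 0 []).length = 8 ∧
       (PySem.List.pyGetD (l.splitOn '-') 1 []).length = 4 ∧
       (PySem.List.pyGetD (l.splitOn '-') 2 []).length = 4 ∧
       (PySem.List.pyGetD (l.splitOn '-') 3 []).length = 4 ∧
       (PySem.List.pyGetD (l.splitOn '-') 4 []).length = 12) ∧
      l.all (fun c => ("0123456789ABCDEFabcdef-".toList).contains c) = true) ↔ pvDecomp l := by
  constructor
  · rintro ⟨h4, ⟨h5, hL0, hL1, hL2, hL3, hL4⟩, hall⟩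
    obtain ⟨p0, p1, p2, p3, p4, hP⟩ :
        ∃ p0 p1 p2 p3 p4, l.splitOn '-' = [p0, p1, p2, p3, p4] := by
      rcases hsp : l.splitOn '-' with _ | ⟨a0, _ | ⟨a1, _ | ⟨a2, _ | ⟨a3, _ | ⟨a4, _ | ⟨a5, t⟩⟩⟩⟩⟩⟩ <;>
        first
          | (exact ⟨a0, a1, a2, a3, a4, rfl⟩)
          | (exfalso; rw [hsp] at h5; simp at h5)
    have hl : l = p0 ++ '-' :: (p1 ++ '-' :: (p2 ++ '-' :: (p3 ++ '-' :: p4))) := by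
      have hi := List.intercalate_splitOn l '-'
      rw [hP] at hi
      simp [List.intercalate] at hi
      simp [← hi]
    rw [hP] at hL0 hL1 hL2 hL3 hL4
    simp [PySem.List.pyGetD, PySem.List.pyGet?, PySem.List.pyIdx?] at hL0 hL1 hL2 hL3 hL4
    rw [hl] at h4
    simp [List.count_append] at h4
    have hc0 : '-' ∉ p0 := by rw [← List.count_eq_zero]; omega
    have hc1 : '-' ∉ p1 := by rw [← List.count_eq_zero]; omega
    have hc2 : '-' ∉ p2 := by rw [← List.count_eq_zero]; omega
    have hc3 : '-' ∉ p3 := by rw [← List.count_eq_zero]; omega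
    have hc4 : '-' ∉ p4 := by rw [← List.count_eq_zero]; omega
    rw [hl] at hall
    simp only [List.all_append, List.all_cons, Bool.and_eq_true] at hall
    exact ⟨p0, p1, p2, p3, p4, hL0, hL1, hL2, hL3, hL4,
      all_hex_of _ hc0 hall.1, all_hex_of _ hc1 hall.2.2.1,
      all_hex_of _ hc2 hall.2.2.2.2.1, all_hex_of _ hc3 hall.2.2.2.2.2.2.1,
      all_hex_of _ hc4 hall.2.2.2.2.2.2.2.2, hl⟩
  · rintro ⟨a, b, c, d, e, hla, hlb, hlc, hld, hle, hha, hhb, hhc, hhd, hhe, rfl⟩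
    have na := not_dash_mem a hha
    have nb := not_dash_mem b hhb
    have nc := not_dash_mem c hhc
    have nd := not_dash_mem d hhd
    have ne' := not_dash_mem e hhe
    have hsplit : (a ++ '-' :: (b ++ '-' :: (c ++ '-' :: (d ++ '-' :: e)))).splitOn '-'
        = [a, b, c, d, e] := by
      rw [splitOn_append_dash _ _ na, splitOn_append_dash _ _ nb,
        splitOn_append_dash _ _ nc, splitOn_append_dash _ _ nd, splitOn_no_dash _ ne']
    refine ⟨?_, ?_, ?_⟩
    · simp [List.count_append, List.count_eq_zero.2 na, List.count_eq_zero.2 nb,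
        List.count_eq_zero.2 nc, List.count_eq_zero.2 nd, List.count_eq_zero.2 ne']
    · rw [hsplit]
      simp [PySem.List.pyGetD, PySem.List.pyGet?, PySem.List.pyIdx?, hla, hlb, hlc, hld, hle]
    · simp only [List.all_append, List.all_cons, Bool.and_eq_true]
      refine ⟨all_hexdash_of _ hha, ?_, all_hexdash_of _ hhb, ?_, all_hexdash_of _ hhc, ?_,
        all_hexdash_of _ hhd, ?_, all_hexdash_of _ hhe⟩ <;> decide

theorem matches_length {p s : List Char} (h : pvMatches p s = true) : p.length = s.length := by
  simp only [pvMatches, Bool.and_eq_true, beq_iff_eq] at h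
  exact h.1

theorem p8_shape : "hhhhhhhh".toList = List.replicate 8 'h' := by decide

theorem isIn_singleton (c : Char) (hs : List Char) :
    PySem.Chars.isIn [c] hs = hs.contains c := by
  rw [Bool.eq_iff_iff]
  simp [PySem.Chars.isIn_iff_infix, List.singleton_infix_iff]

theorem main_list (l : List Char) :
    is_valid_hevy_id (String.ofList l) = is_valid_hevy_id_alt (String.ofList l) := by
  have hdash : ("-" : String).toList = ['-'] := by decide
  have hB : is_valid_hevy_id_alt (String.ofList l)
      = (pvMatches "hhhhhhhh".toList l || pvMatches "hhhhhhhh-hhhh-hhhh-hhhh-hhhhhhhhhhhh".toList l) := by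
    simp [is_valid_hevy_id_alt, pvPatterns, String.toList_ofList]
  have hlen : PySem.Str.len (String.ofList l) = l.length := by
    simp [PySem.Str.len_eq, String.toList_ofList]
  have hcnt : PySem.Str.count (String.ofList l) "-" = l.count '-' := by
    rw [show PySem.Str.count (String.ofList l) "-" = PySem.Chars.count l ['-'] by
      simp [PySem.Str.count_eq, String.toList_ofList, hdash]]
    exact pys_count_dash l
  rw [hB]
  unfold is_valid_hevy_id
  rw [hlen, hcnt, String.toList_ofList, hdash, pys_splitOn_dash]
  by_cases h8 : l.length = 8
  · have h36 : pvMatches "hhhhhhhh-hhhh-hhhh-hhhh-hhhhhhhhhhhh".toList l = false := by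
      cases hm : pvMatches "hhhhhhhh-hhhh-hhhh-hhhh-hhhhhhhhhhhh".toList l
      · rfl
      · have := matches_length hm; rw [h8] at this; simp at this
    rw [h36, p8_shape, matches_rep_h]
    simp only [h8]
    norm_num
    rw [Bool.eq_iff_iff]
    simp [List.all_eq_true, isIn_singleton, pvHexSet]
  · by_cases h36 : l.length = 36
    · have hm8 : pvMatches "hhhhhhhh".toList l = false := by
        cases hm : pvMatches "hhhhhhhh".toList l
        · rfl
        · have := matches_length hm; rw [h36] at this; simp at this
      rw [hm8]
      simp only [h36]
      rw [Bool.eq_iff_iff]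
      simp only [Bool.false_or]
      rw [matches_p36_iff, ← a36_iff]
      simp only [isIn_singleton]
      norm_num
      tauto
    · rcases eq_or_ne l [] with rfl | hnil
      · decide
      · have h8' : ¬((l.length : Int) = 8) := by exact_mod_cast h8
        have h36' : ¬((l.length : Int) = 36) := by exact_mod_cast h36
        have hm8 : pvMatches "hhhhhhhh".toList l = false := by
          cases hm : pvMatches "hhhhhhhh".toList l
          · rfl
          · have := matches_length hm; simp at this; omega
        have hm36 : pvMatches "hhhhhhhh-hhhh-hhhh-hhhh-hhhhhhhhhhhh".toList l = false := by
          cases hm : pvMatches "hhhhhhhh-hhhh-hhhh-hhhh-hhhhhhhhhhhh".toList l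
          · rfl
          · have := matches_length hm; simp at this; omega
        rw [hm8, hm36]
        simp [h8', h36']

-- ===== VERDICT (by name: the statement is the Claim_ definition above) =====
theorem is_valid_hevy_id_spec : Claim_equal_is_valid_hevy_id := by
  intro s _
  unfold Spec_is_valid_hevy_id
  rw [← (String.ofList_toList (s := s))]
  exact main_list s.toList
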